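-- pv_equiv track=rewrite | github.com/William-Carter/PortalSkillCalc | addUnfilledCategories.py | addUnfilledCategories
-- ===== SOURCE A (Python) =====
-- cats = ["glitchless", "legacy", "unrestricted", "inbounds", "oob"]
--
-- def addUnfilledCategories(runner: dict, propagate: bool = True) -> dict:
--     """
--     Adds categories to runner dict that aren't already there.
--     If it can reuse a lower hierarchy time it will (e.g. glitchless will be used for nosla), otherwise it will leave it blank.
--     Parameters:
--         runner - Runner dict with only the categories the player has competed in.
--         propagate - whether to use lower hierarchy times
--     Returns:
--         runner - Runner dict with all categories, with new categories either upfilled or blank.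
--     """
--     containedCategories = []
--     for cat in runner.keys():
--         containedCategories.append(cats.index(cat))
--
--
--     for cat in cats:
--         if not cat in runner.keys():
--             runner[cat] = ""
--
--     if propagate:
--         runner = propagateTimes(runner)
--     return runner
--
-- def propagateTimes(runner: dict):
--     for category in runner:
--         runTimes = []
--         for cat in cats:
--             runTimes.append(runner[cat])
--         validTimes = runTimes[:cats.index(category)+1]
--         validTimes = [i for i in validTimes if i != ""]
--         if len(validTimes) == 0:
--             runner[category] = ""
--         else:
--             runner[category] = min(validTimes)
--
--     return runner
-- ===== SOURCE B (Python) =====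
-- cats = ["glitchless", "legacy", "unrestricted", "inbounds", "oob"]
--
-- def addUnfilledCategories(runner: dict, propagate: bool = True) -> dict:
--     """
--     Adds categories to runner dict that aren't already there.
--     Works on a positional array indexed by hierarchy: the runner's times are
--     placed into the array, optionally replaced by a running prefix minimum
--     (ignoring blanks), and written back. Mutates runner.
--     """
--     times = [""] * len(cats)
--     for cat, time in runner.items():
--         times[cats.index(cat)] = time
--     if propagate:
--         best = ""
--         for i, t in enumerate(times):
--             if t != "" and (best == "" or t < best):
--                 best = t
--             times[i] = best
--     for cat, t in zip(cats, times):
--         runner[cat] = t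
--     return runner
-- ===== Notes on version B (the rewrite author's own statement) =====
-- stated objective: simpler
-- what changed: Replaces A's per-category rebuild of the full times list plus prefix-slice-filter-min (and its unused containedCategories index list) with a positional array indexed by the hierarchy: place each time at cats.index(cat), take one running prefix-minimum pass over the array, and write it back; Pre_ excludes runners with a key outside cats, where both raise ValueError from cats.index, and duplicate-key lists, which cannot arise from a Python dict.
import Mathlib
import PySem

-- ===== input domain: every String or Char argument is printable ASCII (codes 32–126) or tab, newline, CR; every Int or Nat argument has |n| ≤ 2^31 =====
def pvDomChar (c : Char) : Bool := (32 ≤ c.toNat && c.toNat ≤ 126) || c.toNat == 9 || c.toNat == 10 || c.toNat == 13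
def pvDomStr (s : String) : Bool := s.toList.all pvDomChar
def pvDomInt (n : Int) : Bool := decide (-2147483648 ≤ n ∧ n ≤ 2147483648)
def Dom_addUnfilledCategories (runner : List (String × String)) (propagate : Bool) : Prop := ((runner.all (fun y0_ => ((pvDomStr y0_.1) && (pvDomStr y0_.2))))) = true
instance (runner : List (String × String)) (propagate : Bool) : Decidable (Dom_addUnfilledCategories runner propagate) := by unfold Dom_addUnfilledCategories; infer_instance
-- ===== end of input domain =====

-- B works on a positional times array indexed by hierarchy (dict -> array, one prefix-minimum
-- pass, write back) instead of A's per-category full-list rebuild + prefix-slice/filter/min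
-- (objective: simpler). Both mutate `runner` in place in Python; the equivalence proved here
-- is about the returned association list.

-- module constant `cats`
def catsList : List String := ["glitchless", "legacy", "unrestricted", "inbounds", "oob"]

-- ===== PORT A =====
-- helper propagateTimes: the body of `for category in runner:` (reads/writes the same dict)
def propagateStep (d : PySem.Dict String String) (category : String) : PySem.Dict String String :=
  let runTimes := catsList.map (fun cat => d.getD cat "")
  let validTimes := PySem.List.slice runTimes none (some (((PySem.List.index? catsList category).getD 0 : Int) + 1))
  let validTimes := validTimes.filter (fun i => i ≠ "")
  if validTimes.length = 0 then
    d.insert category ""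
  else
    d.insert category ((PySem.List.min? validTimes (fun x => x)).getD "")

def propagateTimes (d : PySem.Dict String String) : PySem.Dict String String :=
  -- `for category in runner:` — only values are overwritten, so the key order is fixed up front
  d.keys.foldl propagateStep d

def addUnfilledCategories (runner : List (String × String)) (propagate : Bool) : List (String × String) :=
  let d : PySem.Dict String String := PySem.Dict.mk runner
  -- containedCategories is never used; its only effect is a ValueError on a key not in cats (excluded by Pre_)
  let _containedCategories := runner.map (fun p => PySem.List.index? catsList p.1)
  let d := catsList.foldl (fun d cat => if d.contains cat then d else d.insert cat "") d
  let d := if propagate then propagateTimes d else d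
  d.items

-- ===== PORT B =====
-- the three loop bodies of B, named so the lemmas below can speak about them
def buildStep (ts : List String) (p : String × String) : List String :=
  -- times[cats.index(cat)] = time  (Python raises ValueError on a key not in cats; outside Pre_)
  match PySem.List.index? catsList p.1 with
  | some i => ts.set i p.2
  | none => ts

def scanStep (st : List String × String) (t : String) : List String × String :=
  let best := if t ≠ "" ∧ (st.2 = "" ∨ t < st.2) then t else st.2
  (st.1 ++ [best], best)

def insStep (d : PySem.Dict String String) (p : String × String) : PySem.Dict String String :=
  d.insert p.1 p.2

def addUnfilledCategories_alt (runner : List (String × String)) (propagate : Bool) : List (String × String) :=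
  let times : List String := runner.foldl buildStep (List.replicate catsList.length "")
  -- in-place prefix-minimum pass, ported as a rebuild of the array front-to-back
  let times := if propagate then (times.foldl scanStep ([], "")).1 else times
  -- for cat, t in zip(cats, times): runner[cat] = t
  ((catsList.zip times).foldl insStep (PySem.Dict.mk runner)).items

-- ===== PRECONDITION & SPEC =====
-- Pre_ excludes exactly the inputs where A raises ValueError (a runner key not in cats); it also
-- requires distinct keys, because the Python argument is a dict and cannot carry duplicate keys
-- (the association list is its Lean representation).
def Pre_addUnfilledCategories (runner : List (String × String)) (propagate : Bool) : Prop :=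
  (runner.map Prod.fst).Nodup ∧ ∀ p ∈ runner, p.1 ∈ catsList

instance (runner : List (String × String)) (propagate : Bool) : Decidable (Pre_addUnfilledCategories runner propagate) := by
  unfold Pre_addUnfilledCategories; infer_instance

def pvWitness_addUnfilledCategories : (List (String × String)) × Bool :=
  ([("legacy", "1:23"), ("oob", "0:59")], true)

def Spec_addUnfilledCategories (runner : List (String × String)) (propagate : Bool) (out : List (String × String)) : Prop := out = addUnfilledCategories_alt runner propagate
instance (runner : List (String × String)) (propagate : Bool) (out : List (String × String)) : Decidable (Spec_addUnfilledCategories runner propagate out) := by unfold Spec_addUnfilledCategories; infer_instance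

-- ===== CLAIM (what is proved, stated in full; the proofs are below) =====
def Claim_equal_addUnfilledCategories : Prop := ∀ (runner : List (String × String)) (propagate : Bool), Dom_addUnfilledCategories runner propagate → Pre_addUnfilledCategories runner propagate → Spec_addUnfilledCategories runner propagate (addUnfilledCategories runner propagate)

-- ===== LEMMAS AND PROOFS =====
def gOp (b v : String) : String := if v = "" then b else if b = "" then v else min b v
theorem gOp_eq_cond (b v : String) : (if v ≠ "" ∧ (b = "" ∨ v < b) then v else b) = gOp b v := by
  unfold gOp
  rcases eq_or_ne v "" with hv | hv <;> rcases eq_or_ne b "" with hb | hb <;>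
      simp only [hv, hb, ne_eq, not_true_eq_false, false_and, not_false_eq_true,
        true_and, false_or, if_neg, if_pos]
  all_goals try simp only [true_or, if_true]
  rcases lt_or_ge v b with h | h
  · rw [if_pos h, min_eq_right h.le]
  · rw [if_neg (not_lt.mpr h), min_eq_left h]
theorem gOp_absorb (b v : String) : gOp b (gOp b v) = gOp b v := by
  rcases eq_or_ne v "" with hv | hv <;> rcases eq_or_ne b "" with hb | hb
  · simp [gOp, hv, hb]
  · simp [gOp, hv, hb]
  · simp [gOp, hv, hb]
  · have hmin : min b v ≠ "" := by rcases min_choice b v with h | h <;> rw [h] <;> assumption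
    simp [gOp, hv, hb, hmin]
def mfold (ws : List String) : String := ws.foldl gOp ""
def aVal (ws : List String) : String :=
  if (ws.filter (fun i => i ≠ "")).length = 0 then ""
  else (PySem.List.min? (ws.filter (fun i => i ≠ "")) (fun x => x)).getD ""

theorem foldl_g_filter (ws : List String) : ∀ b, (ws.filter (fun i => i ≠ "")).foldl gOp b = ws.foldl gOp b := by
  induction ws with
  | nil => intro b; rfl
  | cons x t ih =>
    intro b
    simp only [ne_eq, decide_not] at ih ⊢
    by_cases hx : x = ""
    · simp [hx, ih, gOp]
    · simp [hx, ih]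

theorem foldl_g_min (t : List String) : ∀ x, x ≠ "" → (∀ y ∈ t, y ≠ "") → t.foldl gOp x = t.foldl min x := by
  induction t with
  | nil => intro x _ _; rfl
  | cons y t ih =>
    intro x hx ht
    have hy : y ≠ "" := ht y (by simp)
    have hmin : min x y ≠ "" := by rcases min_choice x y with h | h <;> rw [h] <;> assumption
    simp only [List.foldl_cons]
    rw [show gOp x y = min x y by simp [gOp, hx, hy]]
    exact ih (min x y) hmin (fun z hz => ht z (by simp [hz]))

theorem aVal_eq_mfold (ws : List String) : aVal ws = mfold ws := by
  unfold aVal mfold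
  rw [← foldl_g_filter]
  simp only [ne_eq, decide_not]
  rcases hf : List.filter (fun i => !decide (i = "")) ws with _ | ⟨x, t⟩
  · simp
  · have hmem : ∀ y ∈ x :: t, y ≠ "" := by
      intro y hy
      have := List.of_mem_filter (hf ▸ hy)
      simpa using this
    have hx : x ≠ "" := hmem x (by simp)
    simp only [List.length_cons, PySem.List.min?_id_cons, Option.getD_some, List.foldl_cons]
    rw [if_neg (by omega)]
    rw [show gOp "" x = x by simp [gOp, hx]]
    exact (foldl_g_min t x hx (fun y hy => hmem y (by simp [hy]))).symm
theorem mfold_append_singleton (xs : List String) (v : String) :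
    mfold (xs ++ [v]) = gOp (mfold xs) v := by
  simp [mfold, List.foldl_append]

theorem mfold_take_congr (o w : List String) (hl : w.length = o.length)
    (hj : ∀ j (h : j < o.length) (h' : j < w.length), w[j] = o[j] ∨ w[j] = mfold (o.take (j+1))) :
    ∀ i, mfold (w.take i) = mfold (o.take i) := by
  intro i
  induction i with
  | zero => simp
  | succ n ih =>
    by_cases hn : n < o.length
    · have hn' : n < w.length := by omega
      rw [List.take_add_one, List.take_add_one, List.getElem?_eq_getElem hn, List.getElem?_eq_getElem hn']
      simp only [Option.toList_some]
      rw [mfold_append_singleton, mfold_append_singleton, ih]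
      rcases hj n hn hn' with h | h
      · rw [h]
      · rw [h]
        have htake : o.take (n+1) = o.take n ++ [o[n]] := by
          rw [List.take_add_one, List.getElem?_eq_getElem hn]; simp
        rw [htake, mfold_append_singleton]
        exact gOp_absorb _ _
    · rw [List.take_of_length_le (by omega : o.length ≤ n), List.take_of_length_le (by omega : w.length ≤ n)] at ih
      rw [List.take_of_length_le (by omega : o.length ≤ n+1), List.take_of_length_le (by omega : w.length ≤ n+1)]
      exact ih

def ovals (e : PySem.Dict String String) : List String := catsList.map (fun c => e.getD c "")
def pfun (e : PySem.Dict String String) (j : Nat) : String := mfold ((ovals e).take (j+1))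

theorem index_cats (j : Nat) (h : j < catsList.length) :
    PySem.List.index? catsList catsList[j] = some j := by
  have h5 : j < 5 := by simpa [catsList] using h
  interval_cases j <;> rfl

theorem cats_nodup : catsList.Nodup := by decide

theorem propagateStep_eq (e d : PySem.Dict String String) (j : Nat) (hj : j < catsList.length)
    (hinv : ∀ j' (h : j' < catsList.length),
      d.getD catsList[j'] "" = e.getD catsList[j'] "" ∨ d.getD catsList[j'] "" = pfun e j') :
    propagateStep d catsList[j] = d.insert catsList[j] (pfun e j) := by
  unfold propagateStep
  rw [index_cats j hj]
  simp only [Option.getD_some]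
  have hcast : ((j : Int) + 1) = ((j + 1 : Nat) : Int) := by push_cast; ring
  rw [hcast, PySem.List.slice_to_natCast]
  rw [← apply_ite (d.insert catsList[j])]
  congr 1
  show aVal ((catsList.map (fun cat => d.getD cat "")).take (j+1)) = pfun e j
  rw [aVal_eq_mfold]
  unfold pfun
  exact mfold_take_congr (ovals e) (catsList.map (fun cat => d.getD cat "")) (by simp [ovals])
    (by
      intro j' h h'
      simp only [List.getElem_map, ovals]
      exact hinv j' (by simpa using h)) (j+1)
theorem foldA (e : PySem.Dict String String) (he : ∀ c ∈ catsList, e.contains c) :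
    ∀ (K : List String) (d : PySem.Dict String String), (∀ c ∈ K, c ∈ catsList) →
    d.keys = e.keys →
    (∀ j' (h : j' < catsList.length),
      d.getD catsList[j'] "" = e.getD catsList[j'] "" ∨ d.getD catsList[j'] "" = pfun e j') →
    (K.foldl propagateStep d).keys = e.keys ∧
      ∀ j (h : j < catsList.length),
        (K.foldl propagateStep d).getD catsList[j] "" =
          if catsList[j] ∈ K then pfun e j else d.getD catsList[j] "" := by
  intro K
  induction K with
  | nil => intro d _ hk hinv; exact ⟨hk, fun j h => by simp⟩
  | cons c K' ih =>
    intro d hsub hk hinv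
    obtain ⟨i, hi, hci⟩ := List.mem_iff_getElem.mp (hsub c (by simp))
    subst hci
    have hcont : d.contains catsList[i] = true := by
      rw [PySem.Dict.contains_iff_mem_keys, hk, ← PySem.Dict.contains_iff_mem_keys]
      exact he _ (by simp)
    have hstep : propagateStep d catsList[i] = d.insert catsList[i] (pfun e i) :=
      propagateStep_eq e d i hi hinv
    have hk1 : (d.insert catsList[i] (pfun e i)).keys = e.keys := by
      rw [PySem.Dict.keys_insert_of_contains d _ hcont, hk]
    have hval1 : ∀ j' (h : j' < catsList.length),
        (d.insert catsList[i] (pfun e i)).getD catsList[j'] "" =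
          if j' = i then pfun e i else d.getD catsList[j'] "" := by
      intro j' h
      rw [PySem.Dict.getD_insert]
      congr 1
      simp [List.Nodup.getElem_inj_iff cats_nodup]
    have hinv1 : ∀ j' (h : j' < catsList.length),
        (d.insert catsList[i] (pfun e i)).getD catsList[j'] "" = e.getD catsList[j'] "" ∨
          (d.insert catsList[i] (pfun e i)).getD catsList[j'] "" = pfun e j' := by
      intro j' h
      rw [hval1 j' h]
      by_cases hji : j' = i
      · subst hji; simp
      · simp only [hji, if_false]; exact hinv j' h
    obtain ⟨hkf, hvf⟩ := ih (d.insert catsList[i] (pfun e i))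
      (fun x hx => hsub x (by simp [hx])) hk1 hinv1
    rw [List.foldl_cons, hstep]
    refine ⟨hkf, fun j h => ?_⟩
    rw [hvf j h]
    by_cases hK' : catsList[j] ∈ K'
    · simp [hK']
    · rw [if_neg hK', hval1 j h]
      by_cases hji : j = i
      · subst hji; simp
      · have hne : catsList[j] ≠ catsList[i] := by
          simp [List.Nodup.getElem_inj_iff cats_nodup, hji]
        simp [hji, hK', hne]
-- B-side: the times array built from runner equals the category values of the filled dict
theorem buildStep_length (ts : List String) (p : String × String) :
    (buildStep ts p).length = ts.length := by
  unfold buildStep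
  cases PySem.List.index? catsList p.1 <;> simp

theorem build_length : ∀ (L : List (String × String)) (ts : List String),
    (L.foldl buildStep ts).length = ts.length := by
  intro L
  induction L with
  | nil => intro ts; rfl
  | cons p L' ih => intro ts; rw [List.foldl_cons, ih, buildStep_length]

theorem build_getD : ∀ (L : List (String × String)) (ts : List String),
    (∀ p ∈ L, p.1 ∈ catsList) → (L.map Prod.fst).Nodup → ts.length = catsList.length →
    ∀ j, j < catsList.length →
      (L.foldl buildStep ts).getD j "" =
        if catsList[j]! ∈ L.map Prod.fst then (PySem.Dict.mk L).getD catsList[j]! "" else ts.getD j "" := by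
  intro L
  induction L with
  | nil => intro ts _ _ _ j hj; simp
  | cons q L' ih =>
    intro ts hmem hnd hlen j hj
    obtain ⟨i, hi, hqi⟩ := List.mem_iff_getElem.mp (hmem q (by simp))
    have hq : buildStep ts q = ts.set i q.2 := by
      unfold buildStep
      rw [← hqi, index_cats i hi]
    have hlen' : (ts.set i q.2).length = catsList.length := by rw [List.length_set]; exact hlen
    have hnd' : (L'.map Prod.fst).Nodup := (List.nodup_cons.mp (by simpa using hnd)).2
    have hq1 : q.1 ∉ L'.map Prod.fst := (List.nodup_cons.mp (by simpa using hnd)).1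
    rw [List.foldl_cons, hq, ih (ts.set i q.2) (fun p hp => hmem p (by simp [hp])) hnd' hlen' j hj]
    have hje : catsList[j]! = catsList[j] := by
      simp [getElem!_pos, hj]
    by_cases hjq : catsList[j] = q.1
    · have hji : j = i := by
        apply (List.Nodup.getElem_inj_iff cats_nodup).mp
        rw [hjq, hqi]
      subst hji
      rw [hje, hjq]
      rw [if_neg hq1, if_pos (by simp)]
      have h1 : (PySem.Dict.mk (q :: L')).getD q.1 "" = q.2 := by
        rw [PySem.Dict.getD_eq_get?_getD, show (q : String × String) = (q.1, q.2) from rfl,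
          PySem.Dict.get?_mk_cons]
        simp
      have h2 : (ts.set j q.2).getD j "" = q.2 := by
        rw [List.getD_eq_getElem (ts.set j q.2) "" (by rw [List.length_set, hlen]; exact hj),
          List.getElem_set_self]
      rw [h1, h2]
    · have hji : j ≠ i := by rintro rfl; exact hjq hqi
      have hcons : (PySem.Dict.mk (q :: L')).getD catsList[j] "" = (PySem.Dict.mk L').getD catsList[j] "" := by
        rw [PySem.Dict.getD_eq_get?_getD, show (q : String × String) = (q.1, q.2) from rfl,
          PySem.Dict.get?_mk_cons, if_neg (by simpa using fun h => hjq (by rw [← h]) ), ← PySem.Dict.getD_eq_get?_getD]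
      have hset : (ts.set i q.2).getD j "" = ts.getD j "" := by
        by_cases hjlt : j < ts.length
        · rw [List.getD_eq_getElem _ _ (by rw [List.length_set]; exact hjlt),
            List.getD_eq_getElem _ _ hjlt, List.getElem_set_ne (by omega)]
        · rw [List.getD_eq_default _ _ (by rw [List.length_set]; omega),
            List.getD_eq_default _ _ (by omega)]
      rw [hje, hcons]
      simp only [List.map_cons, List.mem_cons, hjq, false_or, hset]

-- B-side: the prefix-minimum rebuild pass
def pmins (ws : List String) : List String :=
  (List.range ws.length).map (fun j => mfold (ws.take (j+1)))

theorem pmins_append_singleton (pre : List String) (t : String) :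
    pmins (pre ++ [t]) = pmins pre ++ [mfold (pre ++ [t])] := by
  unfold pmins
  rw [List.length_append, List.length_singleton, List.range_succ, List.map_append]
  congr 1
  · apply List.map_congr_left
    intro j hj
    have hj' : j + 1 ≤ pre.length := by
      have := List.mem_range.mp hj; omega
    rw [List.take_append_of_le_length hj']
  · rw [List.map_singleton, List.take_of_length_le (by simp)]

theorem scan_spec : ∀ (cur pre : List String),
    cur.foldl scanStep (pmins pre, mfold pre) = (pmins (pre ++ cur), mfold (pre ++ cur)) := by
  intro cur
  induction cur with
  | nil => intro pre; simp
  | cons t cur' ih =>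
    intro pre
    have hstep : scanStep (pmins pre, mfold pre) t = (pmins (pre ++ [t]), mfold (pre ++ [t])) := by
      unfold scanStep
      simp only [gOp_eq_cond, ← mfold_append_singleton, pmins_append_singleton]
    rw [List.foldl_cons, hstep, ih (pre ++ [t]), List.append_assoc]
    rfl

-- B-side: the write-back loop over zip cats times
theorem zip_keys : ∀ (l ts : List String) (d d' : PySem.Dict String String),
    d.keys = d'.keys → l.length = ts.length →
    ((l.zip ts).foldl insStep d).keys = (l.foldl (fun d cat => PySem.Dict.setdefault d cat "") d').keys := by
  intro l
  induction l with
  | nil => intro ts d d' hk _; simpa using hk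
  | cons c l' ih =>
    intro ts d d' hk hlen
    cases ts with
    | nil => simp at hlen
    | cons t ts' =>
      rw [List.zip_cons_cons, List.foldl_cons, List.foldl_cons]
      by_cases hc : d.contains c = true
      · have hc' : d'.contains c = true := by
          rw [PySem.Dict.contains_iff_mem_keys, ← hk, ← PySem.Dict.contains_iff_mem_keys]; exact hc
        refine ih ts' _ _ ?_ (by simpa using hlen)
        show (d.insert c t).keys = (d'.setdefault c "").keys
        rw [PySem.Dict.keys_insert_of_contains d _ hc, PySem.Dict.setdefault_of_contains d' _ hc', hk]
      · have hc' : ¬ d'.contains c = true := by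
          rw [PySem.Dict.contains_iff_mem_keys, ← hk, ← PySem.Dict.contains_iff_mem_keys]; exact hc
        refine ih ts' _ _ ?_ (by simpa using hlen)
        show (d.insert c t).keys = (d'.setdefault c "").keys
        rw [PySem.Dict.keys_insert_of_not_contains d _ (by simpa using hc),
          PySem.Dict.setdefault_of_not_contains d' _ (by simpa using hc'),
          PySem.Dict.keys_insert_of_not_contains d' _ (by simpa using hc'), hk]

theorem zip_getD_notmem : ∀ (l ts : List String) (d : PySem.Dict String String) (x : String),
    x ∉ l → ((l.zip ts).foldl insStep d).getD x "" = d.getD x "" := by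
  intro l
  induction l with
  | nil => intro ts d x _; rfl
  | cons c l' ih =>
    intro ts d x hx
    cases ts with
    | nil => rfl
    | cons t ts' =>
      rw [List.zip_cons_cons, List.foldl_cons, ih ts' _ x (fun h => hx (by simp [h]))]
      show (d.insert c t).getD x "" = d.getD x ""
      rw [PySem.Dict.getD_insert, if_neg (fun h => hx (by simp [h]))]

theorem zip_getD : ∀ (l ts : List String) (d : PySem.Dict String String),
    l.Nodup → l.length = ts.length →
    ∀ j (hj : j < l.length),
      ((l.zip ts).foldl insStep d).getD l[j] "" = ts.getD j "" := by
  intro l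
  induction l with
  | nil => intro ts d _ _ j hj; simp at hj
  | cons c l' ih =>
    intro ts d hnd hlen j hj
    cases ts with
    | nil => simp at hlen
    | cons t ts' =>
      rw [List.zip_cons_cons, List.foldl_cons]
      cases j with
      | zero =>
        have hc : c ∉ l' := (List.nodup_cons.mp hnd).1
        rw [show (c :: l')[0] = c from rfl, zip_getD_notmem l' ts' _ c hc]
        show (d.insert c t).getD c "" = (t :: ts').getD 0 ""
        rw [PySem.Dict.getD_insert, if_pos rfl]; rfl
      | succ j' =>
        rw [show (c :: l')[j' + 1] = l'[j']'(by simpa using hj) from rfl,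
          ih ts' _ (List.nodup_cons.mp hnd).2 (by simpa using hlen) j' (by simpa using hj)]
        rfl

theorem fill_eq : ∀ (l : List String) (d : PySem.Dict String String),
    l.foldl (fun d cat => if d.contains cat then d else d.insert cat "") d =
      l.foldl (fun d cat => PySem.Dict.setdefault d cat "") d := by
  intro l
  induction l with
  | nil => intro d; rfl
  | cons c t ih =>
    intro d
    simp only [List.foldl_cons]
    by_cases hc : d.contains c = true
    · rw [if_pos hc, PySem.Dict.setdefault_of_contains d _ hc, ih]
    · rw [if_neg hc, PySem.Dict.setdefault_of_not_contains d _ (by simpa using hc), ih]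

theorem fill_props : ∀ (l : List String) (d : PySem.Dict String String), d.keys.Nodup →
    (l.foldl (fun d cat => PySem.Dict.setdefault d cat "") d).keys.Nodup ∧
      ∀ c, c ∈ (l.foldl (fun d cat => PySem.Dict.setdefault d cat "") d).keys ↔ c ∈ d.keys ∨ c ∈ l := by
  intro l
  induction l with
  | nil => intro d hd; exact ⟨hd, fun c => by simp⟩
  | cons x t ih =>
    intro d hd
    simp only [List.foldl_cons]
    by_cases hx : d.contains x = true
    · obtain ⟨h1, h2⟩ := ih (d.setdefault x "") (by rwa [PySem.Dict.setdefault_of_contains d _ hx])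
      refine ⟨h1, fun c => ?_⟩
      rw [h2, PySem.Dict.setdefault_of_contains d _ hx]
      have hxk : x ∈ d.keys := (PySem.Dict.contains_iff_mem_keys d x).mp hx
      constructor
      · rintro (h | h)
        · exact Or.inl h
        · exact Or.inr (List.mem_cons_of_mem x h)
      · rintro (h | h)
        · exact Or.inl h
        · rcases List.mem_cons.mp h with h' | h'
          · exact Or.inl (h' ▸ hxk)
          · exact Or.inr h'
    · have hxmem : x ∉ d.keys := by
        rw [← PySem.Dict.contains_iff_mem_keys]; simpa using hx
      have hkeys : (d.setdefault x "").keys = d.keys ++ [x] := by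
        rw [PySem.Dict.setdefault_of_not_contains d _ (by simpa using hx),
          PySem.Dict.keys_insert_of_not_contains d _ (by simpa using hx)]
      obtain ⟨h1, h2⟩ := ih (d.setdefault x "")
        (by
          rw [hkeys]
          refine List.Nodup.append hd (List.nodup_singleton x) (fun a ha hb => ?_)
          simp only [List.mem_singleton] at hb
          subst hb
          exact hxmem ha)
      refine ⟨h1, fun c => ?_⟩
      rw [h2, hkeys]
      simp [or_assoc, or_comm, or_left_comm]

theorem fill_getD : ∀ (l : List String) (d : PySem.Dict String String) (x : String),
    (l.foldl (fun d cat => PySem.Dict.setdefault d cat "") d).getD x "" = d.getD x "" := by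
  intro l
  induction l with
  | nil => intro d x; rfl
  | cons c t ih =>
    intro d x
    rw [List.foldl_cons, ih]
    by_cases hc : d.contains c = true
    · rw [PySem.Dict.setdefault_of_contains d _ hc]
    · rw [PySem.Dict.setdefault_of_not_contains d _ (by simpa using hc), PySem.Dict.getD_insert]
      by_cases hx : x = c
      · subst hx
        rw [if_pos rfl, PySem.Dict.getD_of_not_contains d _ (by simpa using hc)]
      · rw [if_neg hx]

theorem main_equiv (runner : List (String × String)) (propagate : Bool)
    (hnd : (runner.map Prod.fst).Nodup) (hmem : ∀ p ∈ runner, p.1 ∈ catsList) :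
    addUnfilledCategories runner propagate = addUnfilledCategories_alt runner propagate := by
  unfold addUnfilledCategories addUnfilledCategories_alt
  dsimp only
  rw [fill_eq]
  have hnd0 : (PySem.Dict.mk runner).keys.Nodup := by simpa using hnd
  obtain ⟨hend, hemem⟩ := fill_props catsList (PySem.Dict.mk runner) hnd0
  set e := catsList.foldl (fun d cat => PySem.Dict.setdefault d cat "") (PySem.Dict.mk runner) with he_def
  have he3 : ∀ k ∈ e.keys, k ∈ catsList := by
    intro k hk
    rcases (hemem k).mp hk with h | h
    · obtain ⟨p, hp, hpk⟩ := List.mem_map.mp h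
      exact hpk ▸ hmem p hp
    · exact h
  have he : ∀ c ∈ catsList, e.contains c = true := fun c hc =>
    (PySem.Dict.contains_iff_mem_keys e c).mpr ((hemem c).mpr (Or.inr hc))
  -- the built times array equals the category values of the filled dict e
  have hblen : (runner.foldl buildStep (List.replicate catsList.length "")).length = catsList.length := by
    rw [build_length, List.length_replicate]
  have hbuild : runner.foldl buildStep (List.replicate catsList.length "") = ovals e := by
    apply List.ext_getElem
    · rw [hblen]; simp [ovals]
    · intro j hj hj'
      have hjc : j < catsList.length := by rwa [hblen] at hj
      rw [← List.getD_eq_getElem _ "" hj,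
        build_getD runner _ hmem hnd (by simp) j hjc]
      have hje : catsList[j]! = catsList[j] := getElem!_pos catsList j hjc
      have hov : (ovals e)[j]'hj' = e.getD catsList[j] "" := by simp [ovals]
      rw [hje, hov, he_def, fill_getD]
      by_cases hm : catsList[j] ∈ runner.map Prod.fst
      · rw [if_pos hm]
      · rw [if_neg hm, PySem.Dict.getD_of_not_contains _ _ (by
          rw [← Bool.not_eq_true, PySem.Dict.contains_iff_mem_keys]
          simpa using hm)]
        simp
  rw [hbuild]
  -- both branches: the final dict has keys e.keys and value ts.getD j at catsList[j]
  have hfin : ∀ (ts : List String), ts.length = catsList.length →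
      (∀ j (hj : j < catsList.length), ts.getD j "" = (if propagate then pfun e j else e.getD catsList[j] "")) →
      (if propagate then propagateTimes e else e).items = ((catsList.zip ts).foldl insStep (PySem.Dict.mk runner)).items := by
    intro ts hlen hval
    have hfk : ((catsList.zip ts).foldl insStep (PySem.Dict.mk runner)).keys = e.keys :=
      zip_keys catsList ts _ _ rfl hlen.symm
    have hAk : (if propagate then propagateTimes e else e).keys = e.keys ∧
        ∀ j (hj : j < catsList.length),
          (if propagate then propagateTimes e else e).getD catsList[j] "" =
            (if propagate then pfun e j else e.getD catsList[j] "") := by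
      cases propagate
      · exact ⟨rfl, fun j hj => rfl⟩
      · obtain ⟨hk, hv⟩ := foldA e he e.keys e he3 rfl (fun j' h => Or.inl rfl)
        refine ⟨hk, fun j hj => ?_⟩
        simp only [if_true]
        show (propagateTimes e).getD catsList[j] "" = pfun e j
        unfold propagateTimes
        by_cases hkm : catsList[j] ∈ e.keys
        · rw [hv j hj, if_pos hkm]
        · exfalso
          exact hkm ((hemem catsList[j]).mpr (Or.inr (by simp)))
    rw [PySem.Dict.items_eq_map_keys _ (hAk.1 ▸ hend) "",
      PySem.Dict.items_eq_map_keys _ (hfk ▸ hend) "", hAk.1, hfk]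
    apply List.map_congr_left
    intro k hk
    obtain ⟨j, hj, hkj⟩ := List.mem_iff_getElem.mp (he3 k hk)
    subst hkj
    rw [hAk.2 j hj, zip_getD catsList ts _ cats_nodup hlen.symm j hj, hval j hj]
  cases propagate
  · simp only [Bool.false_eq_true, if_false] at hfin ⊢
    exact hfin (ovals e) (by simp [ovals]) (fun j hj => by
      rw [List.getD_eq_getElem _ "" (by simpa [ovals] using hj)]
      simp [ovals])
  · simp only [if_true] at hfin ⊢
    refine hfin ((ovals e).foldl scanStep ([], "")).1 ?_ ?_
    · have := scan_spec (ovals e) []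
      simp only [List.nil_append] at this
      rw [show (([], "") : List String × String) = (pmins [], mfold []) from rfl, this]
      simp [pmins, ovals]
    · intro j hj
      have := scan_spec (ovals e) []
      simp only [List.nil_append] at this
      rw [show (([], "") : List String × String) = (pmins [], mfold []) from rfl, this]
      have hjo : j < (ovals e).length := by simpa [ovals] using hj
      rw [List.getD_eq_getElem _ "" (by simpa [pmins] using hjo)]
      simp only [pmins, List.getElem_map, List.getElem_range]
      rfl

-- ===== VERDICT (by name: the statement is the Claim_ definition above) =====
theorem addUnfilledCategories_spec : Claim_equal_addUnfilledCategories := by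
  intro runner propagate _ hpre
  exact main_equiv runner propagate hpre.1 hpre.2
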